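-- pv_equiv track=rewrite | github.com/GeoscienceAustralia/ginan | scripts/auto_generate_yaml.py | canonicalize_overrides_string
-- ===== SOURCE A (Python) =====
-- def canonicalize_overrides_string(commandline_override_string: str):
--     if not commandline_override_string:
--         return ()
--     override_list = commandline_override_string.split(":")
--     key_value_partitions = [keyval_string.rpartition("=") for keyval_string in override_list if keyval_string]
--     try:
--         first_invalid_override = next(x for x in key_value_partitions if not x[2])
--         raise RuntimeError(
--             f"Provided override string failed to parse.\nNo value found in {first_invalid_override[1]}\n"
--             "Override string provided was: {commandline_override_string}"
--         )
--     except StopIteration: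
--         # All fine, there were no invalid key-value pairs that we found
--         pass
--     return ((x[0], x[2]) for x in key_value_partitions)
-- ===== SOURCE B (Python) =====
-- def canonicalize_overrides_string(commandline_override_string: str):
--     # Single character-level state machine: no split(), no rpartition().
--     pairs = []
--     head, tail, has_eq = [], [], False
--     for ch in commandline_override_string + ":":
--         if ch == ":":
--             if head or tail or has_eq:
--                 if not tail:
--                     raise RuntimeError(
--                         f"Provided override string failed to parse.\n"
--                         f"No value found for key {''.join(head)}\n"
--                         f"Override string provided was: {commandline_override_string}"
--                     )
--                 pairs.append(("".join(head), "".join(tail)))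
--             head, tail, has_eq = [], [], False
--         elif ch == "=":
--             if has_eq:
--                 head.append("=")
--             head += tail
--             tail = []
--             has_eq = True
--         else:
--             tail.append(ch)
--     return tuple(pairs)
-- ===== Notes on version B (the rewrite author's own statement) =====
-- stated objective: alternative
-- what changed: Replaced the split/rpartition/next()-scan/generator pipeline with a single character-level state machine that walks the string once, maintaining the key accumulated so far, the text after the last key/value delimiter, and a delimiter-seen flag, emitting a pair at each separator boundary; Pre_ excludes exactly the inputs on which A raises RuntimeError (a nonempty separated part whose value is empty), where B raises RuntimeError too.
-- outside the precondition, e.g. on canonicalize_overrides_string('='): A raises RuntimeError, B raises RuntimeError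
import Mathlib
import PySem

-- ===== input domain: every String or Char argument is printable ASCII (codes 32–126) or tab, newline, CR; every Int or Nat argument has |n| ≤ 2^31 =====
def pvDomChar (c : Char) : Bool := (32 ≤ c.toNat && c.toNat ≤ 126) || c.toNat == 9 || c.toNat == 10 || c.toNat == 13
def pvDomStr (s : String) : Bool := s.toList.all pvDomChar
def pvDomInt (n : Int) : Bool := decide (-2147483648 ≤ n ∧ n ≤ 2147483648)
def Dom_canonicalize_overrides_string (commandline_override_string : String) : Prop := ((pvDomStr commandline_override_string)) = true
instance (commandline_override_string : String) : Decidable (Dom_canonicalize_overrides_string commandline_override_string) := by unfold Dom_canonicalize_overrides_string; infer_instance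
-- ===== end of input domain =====

-- B replaces A's split/rpartition/next()-scan/generator pipeline by a single character-level state
-- machine over the string (objective: alternative). Equivalence is about the RETURN value; the
-- RuntimeError inputs (where both programs raise) are excluded by Pre_.

-- ===== PORT A =====
-- hand port of str.rpartition("=") (PySem has no rpartition): scan the reversed string for the
-- first '=' (= the last '=' of the string); exact on every input.
def pvRPartRev : List Char → List Char → List Char × List Char × List Char
  | [], acc => ([], [], acc)
  | c :: rest, acc => if c = '=' then (rest.reverse, ['='], acc) else pvRPartRev rest (c :: acc)

def pvRPartition (p : List Char) : List Char × List Char × List Char :=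
  pvRPartRev p.reverse []

def canonicalize_overrides_string (commandline_override_string : String) : List (String × String) :=
  if commandline_override_string = "" then []
  else
    let override_list := PySem.Chars.splitOn commandline_override_string.toList [':']
    let key_value_partitions := (override_list.filter (fun p => !(p.isEmpty))).map pvRPartition
    -- the try/next scan: if some partition has an empty value A raises RuntimeError (outside Pre_)
    if key_value_partitions.any (fun x => x.2.2.isEmpty) then []
    else key_value_partitions.map (fun x => (String.ofList x.1, String.ofList x.2.2))

-- ===== PORT B =====
-- the state machine of Source B: state = (pairs, head, tail, has_eq); the char list is s.toList ++ [':']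
-- (Python's `commandline_override_string + ":"`); `none` = the RuntimeError (outside Pre_).
def pvLoopB : List Char → List (String × String) → List Char → List Char → Bool →
    Option (List (String × String))
  | [], pairs, _, _, _ => some pairs
  | c :: rest, pairs, head, tail, has_eq =>
    if c = ':' then
      if head.isEmpty && tail.isEmpty && !has_eq then pvLoopB rest pairs [] [] false
      else if tail.isEmpty then none
      else pvLoopB rest (pairs ++ [(String.ofList head, String.ofList tail)]) [] [] false
    else if c = '=' then
      pvLoopB rest pairs ((if has_eq then head ++ ['='] else head) ++ tail) [] true
    else pvLoopB rest pairs head (tail ++ [c]) has_eq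

def canonicalize_overrides_string_alt (commandline_override_string : String) : List (String × String) :=
  (pvLoopB (commandline_override_string.toList ++ [':']) [] [] [] false).getD []

-- ===== PRECONDITION & SPEC =====
-- Pre_ excludes exactly the inputs on which A raises RuntimeError (a nonempty ':'-separated part
-- ending in '=', i.e. a key with an empty value); B raises a RuntimeError there too.
def Pre_canonicalize_overrides_string (commandline_override_string : String) : Prop :=
  ∀ p ∈ PySem.Chars.splitOn commandline_override_string.toList [':'],
    PySem.Chars.endswith p ['='] = false
instance (commandline_override_string : String) : Decidable (Pre_canonicalize_overrides_string commandline_override_string) := by unfold Pre_canonicalize_overrides_string; infer_instance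

def pvWitness_canonicalize_overrides_string : String := "a=1:b=2"

def Spec_canonicalize_overrides_string (commandline_override_string : String) (out : List (String × String)) : Prop := out = canonicalize_overrides_string_alt commandline_override_string
instance (commandline_override_string : String) (out : List (String × String)) : Decidable (Spec_canonicalize_overrides_string commandline_override_string out) := by unfold Spec_canonicalize_overrides_string; infer_instance

-- ===== CLAIM (what is proved, stated in full; the proofs are below) =====
def Claim_equal_canonicalize_overrides_string : Prop := ∀ (commandline_override_string : String), Dom_canonicalize_overrides_string commandline_override_string → Pre_canonicalize_overrides_string commandline_override_string → Spec_canonicalize_overrides_string commandline_override_string (canonicalize_overrides_string commandline_override_string)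

-- ===== LEMMAS AND PROOFS =====

-- reference splitter used only by the proofs: accumulate the current part left to right
def pvSp : List Char → List Char → List (List Char)
  | cur, [] => [cur]
  | cur, c :: rest => if c = ':' then cur :: pvSp [] rest else pvSp (cur ++ [c]) rest

theorem pvSp_go (fuel : Nat) (l cur : List Char) (acc : List (List Char)) (h : l.length < fuel) :
    PySem.Chars.splitOn.go [':'] fuel l cur acc = acc.reverse ++ pvSp cur.reverse l := by
  induction fuel generalizing l cur acc with
  | zero => omega
  | succ fuel ih =>
    cases l with
    | nil => simp [PySem.Chars.splitOn.go, pvSp]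
    | cons c rest =>
      by_cases hc : c = ':'
      · rw [PySem.Chars.splitOn.go]
        simp only [hc, List.isPrefixOf, BEq.rfl, Bool.true_and, if_true, List.length_cons,
          List.length_nil, List.drop_succ_cons, List.drop_zero]
        rw [ih rest [] _ (by simpa using Nat.lt_of_succ_lt_succ h)]
        simp [pvSp]
      · rw [PySem.Chars.splitOn.go]
        have hpre : [':'].isPrefixOf (c :: rest) = false := by
          simp [List.isPrefixOf]; exact fun h => absurd h.symm hc
        simp only [hpre, Bool.false_eq_true, ite_false]
        rw [ih rest (c :: cur) acc (by simpa using Nat.lt_of_succ_lt_succ h)]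
        simp [pvSp, hc]

theorem splitOn_eq_pvSp (l : List Char) :
    PySem.Chars.splitOn l [':'] = pvSp [] l := by
  unfold PySem.Chars.splitOn
  simpa using pvSp_go (l.length + 1) l [] [] (by omega)

-- the accumulator of pvRPartRev is appended to the value component
theorem pvRPartRev_acc (r acc : List Char) :
    pvRPartRev r acc = ((pvRPartRev r []).1, (pvRPartRev r []).2.1, (pvRPartRev r []).2.2 ++ acc) := by
  induction r generalizing acc with
  | nil => simp [pvRPartRev]
  | cons c rest ih =>
    by_cases hc : c = '='
    · simp [pvRPartRev, hc]
    · rw [pvRPartRev, if_neg hc, pvRPartRev, if_neg hc, ih (c :: acc), ih [c]]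
      simp

-- rpartition on a snoc: a final '=' becomes the separator, any other char lands on the value
theorem pvRPartition_snoc_eq (q : List Char) : pvRPartition (q ++ ['=']) = (q, ['='], []) := by
  simp [pvRPartition, pvRPartRev]

theorem pvRPartition_snoc_ne (q : List Char) (c : Char) (hc : c ≠ '=') :
    pvRPartition (q ++ [c]) =
      ((pvRPartition q).1, (pvRPartition q).2.1, (pvRPartition q).2.2 ++ [c]) := by
  unfold pvRPartition
  rw [List.reverse_append]
  simp only [List.reverse_singleton, List.singleton_append]
  rw [pvRPartRev, if_neg hc, pvRPartRev_acc]

-- decomposition: the three components of rpartition reassemble the string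
theorem pvRPartition_decomp (q : List Char) :
    ('=' ∈ q → q = (pvRPartition q).1 ++ '=' :: (pvRPartition q).2.2) ∧
    ('=' ∉ q → (pvRPartition q).1 = [] ∧ (pvRPartition q).2.2 = q) := by
  induction q using List.reverseRecOn with
  | nil => simp [pvRPartition, pvRPartRev]
  | append_singleton q c ih =>
    by_cases hc : c = '='
    · subst hc
      refine ⟨fun _ => ?_, fun h => absurd (by simp) h⟩
      rw [pvRPartition_snoc_eq]
    · rw [pvRPartition_snoc_ne q c hc]
      constructor
      · intro hm
        have hmq : '=' ∈ q := by
          rcases List.mem_append.1 hm with h | h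
          · exact h
          · simp at h; exact absurd h.symm hc
        have := ih.1 hmq
        simp only []
        conv_lhs => rw [this]
        simp
      · intro hm
        have hmq : '=' ∉ q := fun h => hm (List.mem_append.2 (Or.inl h))
        have := ih.2 hmq
        simp [this.1, this.2]

-- the value component is empty iff the part is empty or ends with '='
theorem pvRPartition_value_empty_iff (p : List Char) :
    (pvRPartition p).2.2 = [] ↔ p = [] ∨ PySem.Chars.endswith p ['='] = true := by
  induction p using List.reverseRecOn with
  | nil => simp [pvRPartition, pvRPartRev]
  | append_singleton q c _ =>
    by_cases hc : c = '='
    · subst hc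
      rw [pvRPartition_snoc_eq]
      simp [PySem.Chars.endswith_iff, List.suffix_append]
    · rw [pvRPartition_snoc_ne q c hc]
      simp only [List.append_eq_nil_iff, List.cons_ne_self]
      constructor
      · intro h; simp at h
      · rintro (⟨_, h⟩ | h)
        · exact absurd h (by simp)
        · rw [PySem.Chars.endswith_iff] at h
          rcases h with ⟨t, ht⟩
          have : c = '=' := by
            have h2 := congrArg (fun l => l.getLast?) ht
            simpa [List.getLast?_append] using h2.symm
          exact absurd this hc

-- A's projection of a part list, applied by the proofs to both sides
def pvOut (parts : List (List Char)) : List (String × String) :=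
  ((parts.filter (fun p => !(p.isEmpty))).map pvRPartition).map
    (fun x => (String.ofList x.1, String.ofList x.2.2))

-- main invariant: scanning l from the state reached after the current part `cur`
-- produces exactly A's pairs for the parts pvSp cur l
theorem pvLoopB_invariant (l : List Char) (cur : List Char) (pairs : List (String × String))
    (hok : ∀ p ∈ pvSp cur l, ¬ p.isEmpty → (pvRPartition p).2.2 ≠ []) :
    pvLoopB (l ++ [':']) pairs (pvRPartition cur).1 (pvRPartition cur).2.2 (decide ('=' ∈ cur)) =
      some (pairs ++ pvOut (pvSp cur l)) := by
  induction l generalizing cur pairs with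
  | nil =>
    by_cases hcur : cur = []
    · subst hcur
      simp [pvLoopB, pvRPartition, pvRPartRev, pvSp, pvOut]
    · have hval : (pvRPartition cur).2.2 ≠ [] := by
        apply hok cur (by simp [pvSp]) (by simpa [List.isEmpty_iff] using hcur)
      rw [List.nil_append, pvLoopB, if_pos rfl]
      have h1 : ((pvRPartition cur).1.isEmpty && (pvRPartition cur).2.2.isEmpty &&
          !(decide ('=' ∈ cur))) = false := by
        simp only [Bool.and_eq_false_iff]
        left; right
        simpa [List.isEmpty_iff] using hval
      rw [if_neg (by simp [h1]), if_neg (by simpa [List.isEmpty_iff] using hval)]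
      simp [pvLoopB, pvSp, pvOut, hcur]
  | cons c rest ih =>
    by_cases hc : c = ':'
    · subst hc
      rw [List.cons_append, pvLoopB, if_pos rfl]
      have hparts : pvSp cur (':' :: rest) = cur :: pvSp [] rest := by simp [pvSp]
      have hok' : ∀ p ∈ pvSp [] rest, ¬ p.isEmpty → (pvRPartition p).2.2 ≠ [] := by
        intro p hp; exact hok p (by rw [hparts]; exact List.mem_cons_of_mem _ hp)
      by_cases hcur : cur = []
      · subst hcur
        rw [if_pos (by simp [pvRPartition, pvRPartRev])]
        have := ih [] pairs hok'
        simpa [pvRPartition, pvRPartRev, hparts, pvOut] using this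
      · have hval : (pvRPartition cur).2.2 ≠ [] :=
          hok cur (by rw [hparts]; exact List.mem_cons_self) (by simpa [List.isEmpty_iff] using hcur)
        have h1 : ((pvRPartition cur).1.isEmpty && (pvRPartition cur).2.2.isEmpty &&
            !(decide ('=' ∈ cur))) = false := by
          simp only [Bool.and_eq_false_iff]
          left; right
          simpa [List.isEmpty_iff] using hval
        rw [if_neg (by simp [h1]), if_neg (by simpa [List.isEmpty_iff] using hval)]
        have := ih [] (pairs ++ [(String.ofList (pvRPartition cur).1, String.ofList (pvRPartition cur).2.2)]) hok'
        rw [show pvRPartition [] = ([], [], []) from rfl,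
          show (decide ('=' ∈ ([] : List Char))) = false by simp] at this
        rw [this]
        simp [hparts, pvOut, hcur]
    · have hparts : pvSp cur (c :: rest) = pvSp (cur ++ [c]) rest := by simp [pvSp, hc]
      have hok' : ∀ p ∈ pvSp (cur ++ [c]) rest, ¬ p.isEmpty → (pvRPartition p).2.2 ≠ [] := by
        intro p hp; exact hok p (by rw [hparts]; exact hp)
      by_cases he : c = '='
      · subst he
        rw [List.cons_append, pvLoopB, if_neg hc, if_pos rfl]
        have hnew : ((if decide ('=' ∈ cur) = true then (pvRPartition cur).1 ++ ['='] else
            (pvRPartition cur).1) ++ (pvRPartition cur).2.2) = cur := by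
          by_cases hm : '=' ∈ cur
          · rw [if_pos (by simpa using hm)]
            have := (pvRPartition_decomp cur).1 hm
            conv_rhs => rw [this]
            simp
          · rw [if_neg (by simpa using hm)]
            have := (pvRPartition_decomp cur).2 hm
            rw [this.1, this.2]; simp
        have hstate : pvRPartition (cur ++ ['=']) = (cur, ['='], []) := pvRPartition_snoc_eq cur
        have := ih (cur ++ ['=']) pairs hok'
        rw [hstate] at this
        simp only [hnew, hparts]
        simpa using this
      · rw [List.cons_append, pvLoopB, if_neg hc, if_neg he]
        have hstate := pvRPartition_snoc_ne cur c he
        have hmem : decide ('=' ∈ cur ++ [c]) = decide ('=' ∈ cur) := by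
          simp [List.mem_append, (Ne.symm he)]
        have := ih (cur ++ [c]) pairs hok'
        rw [hstate, hmem] at this
        rw [hparts]
        simpa using this

-- Pre_ gives exactly the no-empty-value condition on every part
theorem pre_no_empty_value {s : String} (hpre : Pre_canonicalize_overrides_string s) :
    ∀ p ∈ pvSp [] s.toList, ¬ p.isEmpty → (pvRPartition p).2.2 ≠ [] := by
  intro p hp hne hval
  have hp' : p ∈ PySem.Chars.splitOn s.toList [':'] := by rw [splitOn_eq_pvSp]; exact hp
  have hend := hpre p hp'
  rcases (pvRPartition_value_empty_iff p).1 hval with h | h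
  · exact hne (by simp [h])
  · rw [hend] at h; exact Bool.false_ne_true h

-- ===== VERDICT (by name: the statement is the Claim_ definition above) =====
theorem canonicalize_overrides_string_spec : Claim_equal_canonicalize_overrides_string := by
  intro s _ hpre
  unfold Spec_canonicalize_overrides_string
  unfold canonicalize_overrides_string canonicalize_overrides_string_alt
  have h := pre_no_empty_value hpre
  have hloop := pvLoopB_invariant s.toList [] []
    (by intro p hp hne; exact h p hp hne)
  rw [show pvRPartition [] = ([], [], []) from rfl] at hloop
  rw [show (decide ('=' ∈ ([] : List Char))) = false by simp] at hloop
  by_cases hs : s = ""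
  · subst hs
    rw [if_pos rfl, hloop]
    rfl
  · rw [if_neg hs, hloop]
    rw [splitOn_eq_pvSp]
    have hany : (((pvSp [] s.toList).filter (fun p => !(p.isEmpty))).map pvRPartition).any
        (fun x => x.2.2.isEmpty) = false := by
      rw [List.any_eq_false]
      intro x hx
      rcases List.mem_map.1 hx with ⟨p, hp, rfl⟩
      rcases List.mem_filter.1 hp with ⟨hpm, hpne⟩
      simpa [List.isEmpty_iff] using h p hpm (by simpa using hpne)
    simp [hany, pvOut]
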